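-- pv_equiv track=rewrite | github.com/baxyc/PYS | 5LS/5_2.py | range_nums
-- ===== SOURCE A (Python) =====
-- def range_nums (new_list: list):
--     my_list = []
--     for i in range(len(new_list)):
--         f = new_list[i]
--         lis_1 = [f]
--         for x in range(i + 1, len(new_list)):
--             if new_list[x] > f:
--                 f = new_list[x]
--                 lis_1.append(f)
--         if len(lis_1) > 1:
--             my_list.append(lis_1)
--     return my_list
-- ===== SOURCE B (Python) =====
-- def range_nums(new_list: list):
--     n = len(new_list)
--     # one right-to-left pass: nge[i] = nearest j > i with new_list[j] > new_list[i], else None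
--     nge = [None] * n
--     stack = []
--     for i in range(n - 1, -1, -1):
--         while stack and new_list[stack[-1]] <= new_list[i]:
--             stack.pop()
--         nge[i] = stack[-1] if stack else None
--         stack.append(i)
--     result = []
--     for i in range(n):
--         chain = [new_list[i]]
--         j = nge[i]
--         while j is not None:
--             chain.append(new_list[j])
--             j = nge[j]
--         if len(chain) > 1:
--             result.append(chain)
--     return result
-- ===== Notes on version B (the rewrite author's own statement) =====
-- stated objective: alternative
-- what changed: Replaces A's repeated greedy forward scans with one right-to-left monotonic-stack pass computing next-strictly-greater pointers, then builds each run by pointer chasing; the scan work drops from O(n^2) to O(n) but total cost stays bounded by the output size.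
import Mathlib
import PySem

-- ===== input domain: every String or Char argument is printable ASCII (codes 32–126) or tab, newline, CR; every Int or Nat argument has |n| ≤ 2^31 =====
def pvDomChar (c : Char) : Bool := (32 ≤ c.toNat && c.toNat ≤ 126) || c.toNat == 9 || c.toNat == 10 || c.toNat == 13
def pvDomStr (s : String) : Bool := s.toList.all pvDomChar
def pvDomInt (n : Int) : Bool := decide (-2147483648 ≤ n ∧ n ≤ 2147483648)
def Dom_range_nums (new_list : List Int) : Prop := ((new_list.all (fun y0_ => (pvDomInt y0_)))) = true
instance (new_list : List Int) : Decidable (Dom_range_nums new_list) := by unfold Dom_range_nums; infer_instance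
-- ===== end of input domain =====

-- B replaces A's repeated greedy forward scans by a single right-to-left monotonic-stack
-- pass computing next-strictly-greater pointers, then pointer chasing (objective: alternative).


-- ===== PORT A =====
-- inner loop 'for x in range(i+1, len(new_list)): if new_list[x] > f: …' ; all indexing is
-- in range in the Python, so List.getD is exact.
def scanA (l : List Int) (x : Nat) (f : Int) : List Int :=
  if _h : x < l.length then
    if l.getD x 0 > f then l.getD x 0 :: scanA l (x + 1) (l.getD x 0)
    else scanA l (x + 1) f
  else []
termination_by l.length - x

def range_nums (new_list : List Int) : List (List Int) :=
  (List.range new_list.length).foldl (fun my_list i =>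
    let f := new_list.getD i 0
    let lis_1 := f :: scanA new_list (i + 1) f
    if lis_1.length > 1 then my_list ++ [lis_1] else my_list) []

-- ===== PORT B =====
-- buildNGE l m processes the last m indices right-to-left; returns (nge-table for indices
-- n-m…n-1, monotonic stack with top at the list head).  The Python 'while … pop' is dropWhile.
def buildNGE (l : List Int) : Nat → List (Option Nat) × List Nat
  | 0 => ([], [])
  | m + 1 =>
    let r := buildNGE l m
    let i := l.length - (m + 1)
    let st' := r.2.dropWhile (fun j => l.getD j 0 ≤ l.getD i 0)
    (st'.head? :: r.1, i :: st')

-- the 'while j is not None' pointer chase; fuel = n suffices since pointers strictly increase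
def chase (l : List Int) (tbl : List (Option Nat)) : Nat → Option Nat → List Int
  | 0, _ => []
  | _, none => []
  | fuel + 1, some j => l.getD j 0 :: chase l tbl fuel (tbl.getD j none)

def range_nums_alt (new_list : List Int) : List (List Int) :=
  let tbl := (buildNGE new_list new_list.length).1
  (List.range new_list.length).foldl (fun result i =>
    let chain := new_list.getD i 0 :: chase new_list tbl new_list.length (tbl.getD i none)
    if chain.length > 1 then result ++ [chain] else result) []

-- ===== PRECONDITION & SPEC =====
def Spec_range_nums (new_list : List Int) (out : List (List Int)) : Prop := out = range_nums_alt new_list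
instance (new_list : List Int) (out : List (List Int)) : Decidable (Spec_range_nums new_list out) := by unfold Spec_range_nums; infer_instance

-- ===== CLAIM (what is proved, stated in full; the proofs are below) =====
def Claim_equal_range_nums : Prop := ∀ (new_list : List Int), Dom_range_nums new_list → Spec_range_nums new_list (range_nums new_list)

-- ===== LEMMAS AND PROOFS =====

-- the common specification: first index k ≥ x with l[k] > v
def firstGreater (l : List Int) (v : Int) (x : Nat) : Option Nat :=
  if _h : x < l.length then
    if l.getD x 0 > v then some x else firstGreater l v (x + 1)
  else none
termination_by l.length - x

theorem firstGreater_bounds (l : List Int) (v : Int) (x : Nat) :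
    ∀ k, firstGreater l v x = some k → x ≤ k ∧ k < l.length := by
  fun_induction firstGreater l v x with
  | case1 x hx hgt => intro k h; injection h with h; omega
  | case2 x hx hgt ih => intro k h; have := ih k h; omega
  | case3 x hx => intro k h; cases h

theorem firstGreater_none (l : List Int) (v : Int) (x : Nat) (h : l.length ≤ x) :
    firstGreater l v x = none := by
  rw [firstGreater, dif_neg (Nat.not_lt.mpr h)]

-- A's inner scan in terms of firstGreater
theorem scanA_eq (l : List Int) (x : Nat) (v : Int) :
    scanA l x v = match firstGreater l v x with
      | none => []
      | some k => l.getD k 0 :: scanA l (k + 1) (l.getD k 0) := by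
  fun_induction scanA l x v with
  | case1 x v hx hgt => rw [firstGreater, dif_pos hx, if_pos hgt]
  | case2 x v hx hgt ih => rw [firstGreater, dif_pos hx, if_neg hgt]; exact ih
  | case3 x v hx => rw [firstGreater, dif_neg hx]

theorem dropWhile_dropWhile {a : Type} (p q : a → Bool) (xs : List a)
    (h : ∀ y, p y = true → q y = true) :
    (xs.dropWhile p).dropWhile q = xs.dropWhile q := by
  induction xs with
  | nil => rfl
  | cons y t ih =>
    by_cases hp : p y = true
    · simp [hp, h y hp, ih]
    · simp [List.dropWhile_cons, hp]

-- invariant of the right-to-left pass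
theorem buildNGE_inv (l : List Int) (m : Nat) (hm : m ≤ l.length) :
    (∀ v : Int, (((buildNGE l m).2.dropWhile (fun j => l.getD j 0 ≤ v)).head?) =
        firstGreater l v (l.length - m)) ∧
    (∀ p, p < m → (buildNGE l m).1.getD p none =
        firstGreater l (l.getD (l.length - m + p) 0) (l.length - m + p + 1)) := by
  induction m with
  | zero =>
    refine ⟨fun v => ?_, fun p hp => by omega⟩
    simp only [buildNGE, List.dropWhile_nil, List.head?_nil]
    rw [Nat.sub_zero, firstGreater_none l v l.length le_rfl]
  | succ m ih =>
    obtain ⟨ihst, ihtbl⟩ := ih (by omega)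
    have hi : l.length - (m + 1) + 1 = l.length - m := by omega
    have hil : l.length - (m + 1) < l.length := by omega
    simp only [buildNGE]
    set i := l.length - (m + 1) with hidef
    set st := (buildNGE l m).2 with hst
    set st' := st.dropWhile (fun j => l.getD j 0 ≤ l.getD i 0) with hst'
    have hhead : ∀ v : Int, l.getD i 0 ≤ v →
        (st'.dropWhile (fun j => l.getD j 0 ≤ v)).head? = firstGreater l v (i + 1) := by
      intro v hv
      rw [hst', dropWhile_dropWhile _ _ _ (fun y hy => by
        simp only [decide_eq_true_eq] at hy ⊢; exact le_trans hy hv)]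
      rw [ihst v, hi]
    constructor
    · intro v
      show ((i :: st').dropWhile (fun j => l.getD j 0 ≤ v)).head? = firstGreater l v i
      by_cases hv : l.getD i 0 ≤ v
      · rw [List.dropWhile_cons, if_pos (by simpa using hv), hhead v hv]
        conv_rhs => rw [firstGreater]
        rw [dif_pos hil, if_neg (by omega)]
      · rw [List.dropWhile_cons, if_neg (by simpa using hv)]
        conv_rhs => rw [firstGreater]
        rw [dif_pos hil, if_pos (by omega)]
        rfl
    · intro p hp
      match p with
      | 0 =>
        show st'.head? = firstGreater l (l.getD (i + 0) 0) (i + 0 + 1)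
        rw [hst', ihst (l.getD i 0), hi]
        rfl
      | p + 1 =>
        show (buildNGE l m).1.getD p none = _
        rw [ihtbl p (by omega),
          show i + (p + 1) = l.length - m + p by omega]

-- table correctness at m = n
theorem tbl_correct (l : List Int) (j : Nat) (hj : j < l.length) :
    (buildNGE l l.length).1.getD j none =
      firstGreater l (l.getD j 0) (j + 1) := by
  have := (buildNGE_inv l l.length le_rfl).2 j hj
  simp only [Nat.sub_self, Nat.zero_add] at this
  exact this

-- chase along the correct table equals A's scan
theorem chase_eq_scanA (l : List Int) (fuel x : Nat) (v : Int)
    (hf : l.length - x ≤ fuel) :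
    chase l (buildNGE l l.length).1 fuel (firstGreater l v x) = scanA l x v := by
  induction fuel generalizing x v with
  | zero =>
    have hx : l.length ≤ x := by omega
    rw [firstGreater_none l v x hx, scanA, dif_neg (Nat.not_lt.mpr hx)]
    rfl
  | succ fuel ih =>
    rcases hk : firstGreater l v x with _ | k
    · conv_rhs => rw [scanA_eq l x v, hk]
      rfl
    · obtain ⟨hxk, hkl⟩ := firstGreater_bounds l v x k hk
      conv_rhs => rw [scanA_eq l x v, hk]
      show chase l _ (fuel + 1) (some k) = _
      rw [chase, tbl_correct l k hkl, ih (k + 1) (l.getD k 0) (by omega)]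

-- ===== VERDICT (by name: the statement is the Claim_ definition above) =====
theorem range_nums_spec : Claim_equal_range_nums := by
  intro l _
  show range_nums l = range_nums_alt l
  unfold range_nums range_nums_alt
  apply PySem.List.foldl_congr_mem
  intro acc i hi
  rw [List.mem_range] at hi
  rw [tbl_correct l i hi,
    chase_eq_scanA l l.length (i + 1) (l.getD i 0) (by omega)]
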